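-- pv_equiv track=rewrite | github.com/peloe1/reinforcing-large-networks | model/data.py | reconstruct_complete_path
-- ===== SOURCE A (Python) =====
-- from typing import List, Dict, Any
--
-- def find_path_between_stations(start: str, end: str, topology: Dict) -> List[str]:
--     """
--     Find the shortest path between two stations using BFS.
--     """
--     if start == end:
--         return [start]
--
--     queue = [(start, [start])]
--     visited = set([start])
--
--     while queue:
--         current, path = queue.pop(0)
--
--         for neighbor in topology.get(current, []):
--             if neighbor == end:
--                 return path + [neighbor]
--
--             if neighbor not in visited:
--                 visited.add(neighbor)
--                 queue.append((neighbor, path + [neighbor]))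
--
--     return []  # No path found (shouldn't happen in our connected network)
--
-- def reconstruct_complete_path(timetable_rows: List[Dict]) -> List[str]:
--     """
--     Reconstruct the complete station path from timetable rows,
--     but only validate and fix the relevant subnetwork part.
--     """
--     # Only define topology for our relevant subnetwork
--     RELEVANT_TOPOLOGY = {
--         "KRM": ["KUO"],
--         "KUO": ["KRM", "SOR"],
--         "SOR": ["KUO", "TOI"],
--         "TOI": ["SOR", "SIJ"],
--         "SIJ": ["TOI", "APT", "SKM"],
--         "APT": ["SIJ", "LNA"],
--         "LNA": ["APT", "TE"],
--         "TE": ["LNA", "OHM"],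
--         "OHM": ["TE"],
--         "SKM": ["SIJ", "KNH"],
--         "KNH": ["SKM", "JKI"],
--         "JKI": ["KNH", "LUI"],
--         "LUI": ["JKI"]
--     }
--
--     RELEVANT_STATIONS = set(RELEVANT_TOPOLOGY.keys())
--
--     # Extract unique stations in order from timetable
--     raw_stations = []
--     last_station = None
--
--     for row in timetable_rows:
--         station = row.get('stationShortCode')
--         if station and station != last_station:
--             if station == "KUOT":
--                 station = "KUO"
--             raw_stations.append(station)
--             last_station = station
--
--     if len(raw_stations) < 2:
--         return raw_stations
--
--     # Only reconstruct paths within our relevant subnetwork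
--     reconstructed_path = [raw_stations[0]]
--
--     for i in range(1, len(raw_stations)):
--         current_station = raw_stations[i]
--         previous_station = reconstructed_path[-1]
--
--         # Only validate if both stations are in our relevant subnetwork
--         if previous_station in RELEVANT_STATIONS and current_station in RELEVANT_STATIONS:
--             # Check if direct connection exists in our subnetwork
--             if current_station in RELEVANT_TOPOLOGY.get(previous_station, []):
--                 reconstructed_path.append(current_station)
--             else:
--                 # Find path between relevant stations
--                 path_segment = find_path_between_stations(previous_station, current_station, RELEVANT_TOPOLOGY)
--                 if path_segment:
--                     reconstructed_path.extend(path_segment[1:])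
--                 else:
--                     # If no path found in our subnetwork, just add it (external connection)
--                     reconstructed_path.append(current_station)
--         else:
--             # For stations outside our subnetwork, just trust the raw data
--             reconstructed_path.append(current_station)
--
--     return reconstructed_path
-- ===== SOURCE B (Python) =====
-- # B: same extraction/validation loop shape, but the shortest-path helper is a recursive DFS
-- # (the fixed subnetwork is a tree, so the unique simple path equals BFS's shortest path).
-- _TOP = {
--     "KRM": ["KUO"],
--     "KUO": ["KRM", "SOR"],
--     "SOR": ["KUO", "TOI"],
--     "TOI": ["SOR", "SIJ"],
--     "SIJ": ["TOI", "APT", "SKM"],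
--     "APT": ["SIJ", "LNA"],
--     "LNA": ["APT", "TE"],
--     "TE": ["LNA", "OHM"],
--     "OHM": ["TE"],
--     "SKM": ["SIJ", "KNH"],
--     "KNH": ["SKM", "JKI"],
--     "JKI": ["KNH", "LUI"],
--     "LUI": ["JKI"]
-- }
--
-- def _dfs(current, end, visited):
--     """Depth-first search for the unique simple path current..end in the tree topology."""
--     if current == end:
--         return [current]
--     visited = visited | {current}
--     for n in _TOP.get(current, []):
--         if n not in visited:
--             p = _dfs(n, end, visited)
--             if p is not None:
--                 return [current] + p
--     return None
--
-- def reconstruct_complete_path(timetable_rows):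
--     raw = []
--     for row in timetable_rows:
--         s = row.get('stationShortCode')
--         if s and (not raw or s != raw[-1]):
--             raw.append("KUO" if s == "KUOT" else s)
--
--     if len(raw) < 2:
--         return raw
--
--     out = [raw[0]]
--     for cur in raw[1:]:
--         prev = out[-1]
--         if prev in _TOP and cur in _TOP:
--             seg = _dfs(prev, cur, set())
--             if seg is not None:
--                 out.extend(seg[1:])
--             else:
--                 out.append(cur)
--         else:
--             out.append(cur)
--     return out
-- ===== Notes on version B (the rewrite author's own statement) =====
-- stated objective: alternative
-- what changed: The BFS shortest-path helper (queue of (node, path) pairs popped from the front) is replaced by a recursive DFS that returns the first path reaching the target; since the fixed 13-station subnetwork is a tree, the unique simple path found by DFS equals BFS's shortest path, and the separate direct-connection fast path and the tracked last_station variable are dropped.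
import Mathlib
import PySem

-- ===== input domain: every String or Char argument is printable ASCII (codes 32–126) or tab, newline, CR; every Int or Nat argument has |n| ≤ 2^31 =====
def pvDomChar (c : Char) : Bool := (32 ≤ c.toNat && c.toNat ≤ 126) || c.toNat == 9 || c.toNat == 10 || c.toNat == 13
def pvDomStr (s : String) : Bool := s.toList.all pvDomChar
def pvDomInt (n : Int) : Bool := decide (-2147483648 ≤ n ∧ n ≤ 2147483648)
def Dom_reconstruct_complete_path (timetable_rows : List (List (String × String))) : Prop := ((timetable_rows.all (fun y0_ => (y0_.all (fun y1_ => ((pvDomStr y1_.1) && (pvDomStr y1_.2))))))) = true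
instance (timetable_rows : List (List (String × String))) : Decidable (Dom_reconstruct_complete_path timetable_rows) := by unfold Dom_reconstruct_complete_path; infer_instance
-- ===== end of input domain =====

-- B re-implements the shortest-path helper as a recursive DFS (the fixed subnetwork is a tree,
-- so the unique simple path equals BFS's shortest path); objective: alternative algorithm, same cost.

-- ===== PORT A =====
-- the fixed subnetwork topology: A's RELEVANT_TOPOLOGY = Source B's _TOP (one shared literal)
def topA : PySem.Dict String (List String) := PySem.Dict.mk [
  ("KRM", ["KUO"]), ("KUO", ["KRM", "SOR"]), ("SOR", ["KUO", "TOI"]),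
  ("TOI", ["SOR", "SIJ"]), ("SIJ", ["TOI", "APT", "SKM"]), ("APT", ["SIJ", "LNA"]),
  ("LNA", ["APT", "TE"]), ("TE", ["LNA", "OHM"]), ("OHM", ["TE"]),
  ("SKM", ["SIJ", "KNH"]), ("KNH", ["SKM", "JKI"]), ("JKI", ["KNH", "LUI"]), ("LUI", ["JKI"])]

-- the 'for neighbor in topology.get(current, [])' body of A's BFS: may return a path early,
-- otherwise extends the queue and visited set
def bfsInner (endS : String) (path : List String) :
    List String → List (String × List String) → PySem.Set String →
    Option (List String) × List (String × List String) × PySem.Set String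
  | [], q, v => (none, q, v)
  | n :: ns, q, v =>
    if n = endS then (some (path ++ [n]), q, v)
    else if PySem.Set.contains v n then bfsInner endS path ns q v
    else bfsInner endS path ns (q ++ [(n, path ++ [n])]) (PySem.Set.add v n)

-- A's 'while queue' loop; fuel bounds the iterations (each iteration pops one entry and only
-- unvisited stations are ever enqueued, so 64 ≫ 13 iterations always suffice here)
def bfsLoop (endS : String) (top : PySem.Dict String (List String)) :
    Nat → List (String × List String) → PySem.Set String → List String
  | 0, _, _ => []
  | _ + 1, [], _ => []
  | fuel + 1, (cur, path) :: rest, v =>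
    match bfsInner endS path (PySem.Dict.getD top cur []) rest v with
    | (some p, _, _) => p
    | (none, q, v') => bfsLoop endS top fuel q v'

def find_path_between_stations (start endS : String) (top : PySem.Dict String (List String)) :
    List String :=
  if start = endS then [start]
  else bfsLoop endS top 64 [(start, [start])] (PySem.Set.ofList [start])

def reconstruct_complete_path (timetable_rows : List (List (String × String))) : List String :=
  let top := topA
  let stations := PySem.Set.ofList (PySem.Dict.keys top)
  let st := timetable_rows.foldl (fun (st : Option String × List String) row =>
    match PySem.Dict.get? (PySem.Dict.mk row) "stationShortCode" with
    | none => st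
    | some s =>
      if s ≠ "" ∧ some s ≠ st.1 then
        let s' := if s = "KUOT" then "KUO" else s
        (some s', st.2 ++ [s'])
      else st) (none, [])
  let raw := st.2
  if raw.length < 2 then raw
  else
    (PySem.List.pyRange 1 (raw.length : Int) 1).foldl (fun path i =>
      let cur := PySem.List.pyGetD raw i ""
      let prev := PySem.List.pyGetD path (-1) ""
      if PySem.Set.contains stations prev ∧ PySem.Set.contains stations cur then
        if (PySem.Dict.getD top prev []).contains cur then path ++ [cur]
        else
          let seg := find_path_between_stations prev cur top
          if seg ≠ [] then path ++ seg.drop 1 else path ++ [cur]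
      else path ++ [cur]) [PySem.List.pyGetD raw 0 ""]

-- ===== PORT B =====
-- Source B's recursive _dfs; fuel bounds the recursion depth (≤ 13 stations, 64 always suffices)
def dfsB (fuel : Nat) (current endS : String) (visited : PySem.Set String) :
    Option (List String) :=
  match fuel with
  | 0 => none
  | fuel + 1 =>
    if current = endS then some [current]
    else
      let v := PySem.Set.add visited current
      (PySem.Dict.getD topA current []).foldl (fun acc n =>
        match acc with
        | some _ => acc
        | none =>
          if PySem.Set.contains v n then none
          else
            match dfsB fuel n endS v with
            | some p => some (current :: p)
            | none => none) none

def reconstruct_complete_path_alt (timetable_rows : List (List (String × String))) : List String :=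
  let raw := timetable_rows.foldl (fun (raw : List String) row =>
    match PySem.Dict.get? (PySem.Dict.mk row) "stationShortCode" with
    | none => raw
    | some s =>
      if s ≠ "" ∧ (raw = [] ∨ raw.getLast? ≠ some s) then
        raw ++ [if s = "KUOT" then "KUO" else s]
      else raw) []
  if raw.length < 2 then raw
  else
    match raw with
    | [] => []
    | r0 :: rest =>
      rest.foldl (fun out cur =>
        let prev := out.getLastD ""
        if PySem.Dict.contains topA prev ∧ PySem.Dict.contains topA cur then
          match dfsB 64 prev cur PySem.Set.empty with
          | some seg => out ++ seg.drop 1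
          | none => out ++ [cur]
        else out ++ [cur]) [r0]

-- ===== PRECONDITION & SPEC =====
def Spec_reconstruct_complete_path (timetable_rows : List (List (String × String))) (out : List String) : Prop := out = reconstruct_complete_path_alt timetable_rows
instance (timetable_rows : List (List (String × String))) (out : List String) : Decidable (Spec_reconstruct_complete_path timetable_rows out) := by unfold Spec_reconstruct_complete_path; infer_instance

-- ===== CLAIM (what is proved, stated in full; the proofs are below) =====
def Claim_equal_reconstruct_complete_path : Prop := ∀ (timetable_rows : List (List (String × String))), Dom_reconstruct_complete_path timetable_rows → Spec_reconstruct_complete_path timetable_rows (reconstruct_complete_path timetable_rows)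

-- ===== LEMMAS AND PROOFS =====

-- the suffix A's validation loop appends in one step (prev = current end of the path, cur next station)
def sufA (prev cur : String) : List String :=
  if PySem.Set.contains (PySem.Set.ofList (PySem.Dict.keys topA)) prev ∧
     PySem.Set.contains (PySem.Set.ofList (PySem.Dict.keys topA)) cur then
    if (PySem.Dict.getD topA prev []).contains cur then [cur]
    else
      let seg := find_path_between_stations prev cur topA
      if seg ≠ [] then seg.drop 1 else [cur]
  else [cur]

-- the suffix B's validation loop appends in one step
def sufB (prev cur : String) : List String :=
  if PySem.Dict.contains topA prev ∧ PySem.Dict.contains topA cur then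
    match dfsB 64 prev cur PySem.Set.empty with
    | some seg => seg.drop 1
    | none => [cur]
  else [cur]

-- on the finite topology, BFS and DFS produce the same path segment (169 concrete cases)
set_option maxHeartbeats 1000000 in
lemma allpairs : ∀ p ∈ PySem.Dict.keys topA, ∀ c ∈ PySem.Dict.keys topA, sufA p c = sufB p c := by
  decide

lemma suf_eq (prev cur : String) : sufA prev cur = sufB prev cur := by
  by_cases hp : prev ∈ PySem.Dict.keys topA
  · by_cases hc : cur ∈ PySem.Dict.keys topA
    · exact allpairs prev hp cur hc
    · have hcB : PySem.Dict.contains topA cur = false := by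
        rw [PySem.Dict.contains_eq_decide_mem_keys]
        simpa using hc
      simp [sufA, sufB, hcB, hc]
  · have hpB : PySem.Dict.contains topA prev = false := by
      rw [PySem.Dict.contains_eq_decide_mem_keys]
      simpa using hp
    simp [sufA, sufB, hpB, hp]

lemma pyGetD_neg_one_getLastD (xs : List String) (d : String) :
    PySem.List.pyGetD xs (-1) d = xs.getLastD d := by
  cases hx : xs with
  | nil => simp [PySem.List.pyGetD, PySem.List.pyGet?, PySem.List.pyIdx?]
  | cons y ys =>
    rw [PySem.List.pyGetD_neg_one (y :: ys) d (by simp)]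
    simp [List.getLastD_eq_getLast?, List.getLast?_eq_some_getLast]

-- extraction loops agree: A's (last_station, raw) state vs B's raw with raw[-1]
lemma extract_eq (rows : List (List (String × String))) (raw0 : List String) :
    rows.foldl (fun (st : Option String × List String) row =>
      match PySem.Dict.get? (PySem.Dict.mk row) "stationShortCode" with
      | none => st
      | some s =>
        if s ≠ "" ∧ some s ≠ st.1 then
          let s' := if s = "KUOT" then "KUO" else s
          (some s', st.2 ++ [s'])
        else st) (raw0.getLast?, raw0)
    = (let r := rows.foldl (fun (raw : List String) row =>
        match PySem.Dict.get? (PySem.Dict.mk row) "stationShortCode" with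
        | none => raw
        | some s =>
          if s ≠ "" ∧ (raw = [] ∨ raw.getLast? ≠ some s) then
            raw ++ [if s = "KUOT" then "KUO" else s]
          else raw) raw0
       (r.getLast?, r)) := by
  induction rows generalizing raw0 with
  | nil => rfl
  | cons row rows ih =>
    simp only [List.foldl_cons]
    cases hg : PySem.Dict.get? (PySem.Dict.mk row) "stationShortCode" with
    | none => simp only [hg]; exact ih raw0
    | some s =>
      simp only [hg]
      have hcond : (s ≠ "" ∧ some s ≠ raw0.getLast?) ↔ (s ≠ "" ∧ (raw0 = [] ∨ raw0.getLast? ≠ some s)) := by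
        cases raw0 with
        | nil => simp
        | cons z zs => simp [eq_comm]
      by_cases hc : s ≠ "" ∧ some s ≠ raw0.getLast?
      · rw [if_pos hc, if_pos (hcond.mp hc)]
        have := ih (raw0 ++ [if s = "KUOT" then "KUO" else s])
        rw [List.getLast?_concat] at this
        exact this
      · rw [if_neg hc, if_neg (fun h => hc (hcond.mpr h))]
        exact ih raw0

-- A's loop body equals 'path ++ sufA prev cur'
lemma bodyA_eq (path : List String) (cur : String) :
    (let prev := PySem.List.pyGetD path (-1) ""
     if PySem.Set.contains (PySem.Set.ofList (PySem.Dict.keys topA)) prev ∧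
        PySem.Set.contains (PySem.Set.ofList (PySem.Dict.keys topA)) cur then
       if (PySem.Dict.getD topA prev []).contains cur then path ++ [cur]
       else
         let seg := find_path_between_stations prev cur topA
         if seg ≠ [] then path ++ seg.drop 1 else path ++ [cur]
     else path ++ [cur])
    = path ++ sufA (path.getLastD "") cur := by
  simp only [pyGetD_neg_one_getLastD, sufA]
  split_ifs <;> rfl

-- B's loop body equals 'out ++ sufB prev cur'
lemma bodyB_eq (out : List String) (cur : String) :
    (let prev := out.getLastD ""
     if PySem.Dict.contains topA prev ∧ PySem.Dict.contains topA cur then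
       match dfsB 64 prev cur PySem.Set.empty with
       | some seg => out ++ seg.drop 1
       | none => out ++ [cur]
     else out ++ [cur])
    = out ++ sufB (out.getLastD "") cur := by
  simp only [sufB]
  split_ifs with h
  · cases hd : dfsB 64 (out.getLastD "") cur PySem.Set.empty <;> simp
  · rfl

-- validation loops agree
lemma valid_eq (rest : List String) (init : List String) :
    rest.foldl (fun path cur =>
      let prev := PySem.List.pyGetD path (-1) ""
      if PySem.Set.contains (PySem.Set.ofList (PySem.Dict.keys topA)) prev ∧
         PySem.Set.contains (PySem.Set.ofList (PySem.Dict.keys topA)) cur then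
        if (PySem.Dict.getD topA prev []).contains cur then path ++ [cur]
        else
          let seg := find_path_between_stations prev cur topA
          if seg ≠ [] then path ++ seg.drop 1 else path ++ [cur]
      else path ++ [cur]) init
    = rest.foldl (fun out cur =>
        let prev := out.getLastD ""
        if PySem.Dict.contains topA prev ∧ PySem.Dict.contains topA cur then
          match dfsB 64 prev cur PySem.Set.empty with
          | some seg => out ++ seg.drop 1
          | none => out ++ [cur]
        else out ++ [cur]) init := by
  apply PySem.List.foldl_congr_mem
  intro acc x _
  rw [bodyA_eq, bodyB_eq, suf_eq]

-- the tail of both functions, as a function of the extracted station list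
lemma finish (raw : List String) :
    (if raw.length < 2 then raw
     else
       (PySem.List.pyRange 1 (raw.length : Int) 1).foldl (fun path i =>
         let cur := PySem.List.pyGetD raw i ""
         let prev := PySem.List.pyGetD path (-1) ""
         if PySem.Set.contains (PySem.Set.ofList (PySem.Dict.keys topA)) prev ∧
            PySem.Set.contains (PySem.Set.ofList (PySem.Dict.keys topA)) cur then
           if (PySem.Dict.getD topA prev []).contains cur then path ++ [cur]
           else
             let seg := find_path_between_stations prev cur topA
             if seg ≠ [] then path ++ seg.drop 1 else path ++ [cur]
         else path ++ [cur]) [PySem.List.pyGetD raw 0 ""])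
    = (if raw.length < 2 then raw
       else
         match raw with
         | [] => []
         | r0 :: rest =>
           rest.foldl (fun out cur =>
             let prev := out.getLastD ""
             if PySem.Dict.contains topA prev ∧ PySem.Dict.contains topA cur then
               match dfsB 64 prev cur PySem.Set.empty with
               | some seg => out ++ seg.drop 1
               | none => out ++ [cur]
             else out ++ [cur]) [r0]) := by
  by_cases hlen : raw.length < 2
  · simp [hlen]
  · cases raw with
    | nil => simp at hlen
    | cons r0 rest =>
      rw [if_neg hlen, if_neg hlen, PySem.List.pyGetD_zero_cons]
      refine Eq.trans (PySem.List.foldl_pyRange_pyGetD' (r0 :: rest) ""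
        (fun path cur =>
          let prev := PySem.List.pyGetD path (-1) ""
          if PySem.Set.contains (PySem.Set.ofList (PySem.Dict.keys topA)) prev ∧
             PySem.Set.contains (PySem.Set.ofList (PySem.Dict.keys topA)) cur then
            if (PySem.Dict.getD topA prev []).contains cur then path ++ [cur]
            else
              let seg := find_path_between_stations prev cur topA
              if seg ≠ [] then path ++ seg.drop 1 else path ++ [cur]
          else path ++ [cur])
        [r0] (by norm_num : (0:Int) ≤ 1)) ?_
      show (List.drop (1:Int).toNat (r0 :: rest)).foldl _ [r0] = _
      simp only [Int.toNat_one, List.drop_succ_cons, List.drop_zero]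
      exact valid_eq rest [r0]

-- ===== VERDICT (by name: the statement is the Claim_ definition above) =====
theorem reconstruct_complete_path_spec : Claim_equal_reconstruct_complete_path := by
  intro timetable_rows _
  show reconstruct_complete_path timetable_rows = reconstruct_complete_path_alt timetable_rows
  simp only [reconstruct_complete_path, reconstruct_complete_path_alt]
  have he := extract_eq timetable_rows []
  simp only [List.getLast?_nil] at he
  rw [he]
  exact finish (timetable_rows.foldl (fun (raw : List String) row =>
    match PySem.Dict.get? (PySem.Dict.mk row) "stationShortCode" with
    | none => raw
    | some s =>
      if s ≠ "" ∧ (raw = [] ∨ raw.getLast? ≠ some s) then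
        raw ++ [if s = "KUOT" then "KUO" else s]
      else raw) [])
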